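-- pv_equiv track=rewrite | github.com/daniel-deiana/leetCode | backtracking/subsets2.py | hasSameFreq
-- ===== SOURCE A (Python) =====
-- def hasSameFreq(a: dict, b : dict):
--     for key in a.keys():
--         if key not in b or b[key] != a[key]:
--             return False
--
--     for key in b.keys():
--         if key not in a or b[key] != a[key]:
--             return False
--
--     return True
-- ===== SOURCE B (Python) =====
-- def hasSameFreq(a: dict, b: dict):
--     return sorted(a.items(), key=lambda kv: kv[0]) == sorted(b.items(), key=lambda kv: kv[0])
-- ===== Notes on version B (the rewrite author's own statement) =====
-- stated objective: alternative
-- what changed: A runs two symmetric key-by-key membership/lookup loops over the two dicts; B instead canonicalises both dicts by sorting their item lists by key and compares the two sorted lists for equality in one shot (correct because dict keys are unique, so the key-sorted item list is a canonical form of the mapping).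
import Mathlib
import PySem

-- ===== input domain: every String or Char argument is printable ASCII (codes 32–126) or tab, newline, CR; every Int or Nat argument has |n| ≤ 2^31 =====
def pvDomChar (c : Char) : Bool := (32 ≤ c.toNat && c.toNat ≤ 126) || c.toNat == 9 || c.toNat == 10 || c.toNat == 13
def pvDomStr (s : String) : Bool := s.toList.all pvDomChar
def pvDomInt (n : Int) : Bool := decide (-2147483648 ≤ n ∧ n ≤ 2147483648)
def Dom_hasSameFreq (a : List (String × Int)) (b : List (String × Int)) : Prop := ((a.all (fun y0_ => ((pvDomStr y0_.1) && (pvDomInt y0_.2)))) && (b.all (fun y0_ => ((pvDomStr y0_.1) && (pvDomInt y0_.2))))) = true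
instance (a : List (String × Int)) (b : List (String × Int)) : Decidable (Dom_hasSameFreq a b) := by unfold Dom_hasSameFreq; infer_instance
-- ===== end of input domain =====

-- B canonicalises both dicts by sorting their item lists by key and compares the sorted lists,
-- instead of A's two directional key-by-key lookup loops (alternative algorithm; same result).

-- ===== PORT A =====
-- 'for key in xkeys: if key not in y or y[key] != x[key]: return False' (value compare via get?,
-- which under the 'key in y' guard and key ∈ x.keys is exactly Python's b[key] != a[key])
def pvLoopA (x y : PySem.Dict String Int) : List String → Bool
  | [] => true
  | k :: ks => if !(y.contains k) || (y.get? k != x.get? k) then false else pvLoopA x y ks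

def hasSameFreq (a : List (String × Int)) (b : List (String × Int)) : Bool :=
  let da := PySem.Dict.ofList a
  let db := PySem.Dict.ofList b
  if pvLoopA da db da.keys = false then false
  else if pvLoopA db da db.keys = false then false
  else true

-- ===== PORT B =====
-- 'sorted(a.items(), key=lambda kv: kv[0]) == sorted(b.items(), key=lambda kv: kv[0])'
def hasSameFreq_alt (a : List (String × Int)) (b : List (String × Int)) : Bool :=
  PySem.List.sorted (PySem.Dict.ofList a).items (fun kv => kv.1)
    == PySem.List.sorted (PySem.Dict.ofList b).items (fun kv => kv.1)

-- ===== PRECONDITION & SPEC =====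
def Spec_hasSameFreq (a : List (String × Int)) (b : List (String × Int)) (out : Bool) : Prop := out = hasSameFreq_alt a b
instance (a : List (String × Int)) (b : List (String × Int)) (out : Bool) : Decidable (Spec_hasSameFreq a b out) := by unfold Spec_hasSameFreq; infer_instance

-- ===== CLAIM (what is proved, stated in full; the proofs are below) =====
def Claim_equal_hasSameFreq : Prop := ∀ (a : List (String × Int)) (b : List (String × Int)), Dom_hasSameFreq a b → Spec_hasSameFreq a b (hasSameFreq a b)

-- ===== LEMMAS AND PROOFS =====

theorem pvLoopA_eq_all (x y : PySem.Dict String Int) (ks : List String) :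
    pvLoopA x y ks = ks.all (fun k => y.contains k && (y.get? k == x.get? k)) := by
  induction ks with
  | nil => rfl
  | cons k ks ih =>
    simp only [pvLoopA, List.all_cons, ih]
    by_cases h1 : y.contains k <;> by_cases h2 : y.get? k = x.get? k <;> simp [h1, h2]

-- A's double loop succeeds exactly when the two item lists are permutations of each other.
theorem pvDirProp_iff_perm (da db : PySem.Dict String Int)
    (ha : da.keys.Nodup) (hb : db.keys.Nodup) :
    ((∀ k ∈ da.keys, db.contains k = true ∧ db.get? k = da.get? k) ∧
     (∀ k ∈ db.keys, da.contains k = true ∧ da.get? k = db.get? k))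
    ↔ da.items.Perm db.items := by
  have hia : da.items.Nodup := ha.of_map
  have hib : db.items.Nodup := hb.of_map
  constructor
  · rintro ⟨h1, h2⟩
    have s1 : da.items ⊆ db.items := by
      rintro ⟨k, v⟩ hkv
      have hk : k ∈ da.keys := PySem.Dict.mem_keys_of_mem_items da hkv
      have : db.get? k = some v := by
        rw [(h1 k hk).2]; exact PySem.Dict.get?_of_mem_items da hkv ha
      exact PySem.Dict.mem_items_of_get?_eq_some db this
    have s2 : db.items ⊆ da.items := by
      rintro ⟨k, v⟩ hkv
      have hk : k ∈ db.keys := PySem.Dict.mem_keys_of_mem_items db hkv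
      have : da.get? k = some v := by
        rw [(h2 k hk).2]; exact PySem.Dict.get?_of_mem_items db hkv hb
      exact PySem.Dict.mem_items_of_get?_eq_some da this
    exact (hia.subperm s1).antisymm (hib.subperm s2)
  · intro hperm
    constructor
    · intro k hk
      obtain ⟨⟨k', v⟩, hmem, hk'⟩ := List.mem_map.mp hk
      subst hk'
      have h1 : da.get? k' = some v := PySem.Dict.get?_of_mem_items da hmem ha
      have h2 : db.get? k' = some v :=
        PySem.Dict.get?_of_mem_items db (hperm.mem_iff.mp hmem) hb
      refine ⟨?_, by rw [h1, h2]⟩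
      rw [PySem.Dict.contains_eq_isSome_get?, h2]; rfl
    · intro k hk
      obtain ⟨⟨k', v⟩, hmem, hk'⟩ := List.mem_map.mp hk
      subst hk'
      have h2 : db.get? k' = some v := PySem.Dict.get?_of_mem_items db hmem hb
      have h1 : da.get? k' = some v :=
        PySem.Dict.get?_of_mem_items da (hperm.mem_iff.mpr hmem) ha
      refine ⟨?_, by rw [h1, h2]⟩
      rw [PySem.Dict.contains_eq_isSome_get?, h1]; rfl

-- With nodup keys, the key-sorted item list is canonical: sorted equality ⟺ permutation.
theorem sorted_items_eq_iff_perm (ia ib : List (String × Int))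
    (ha : (ia.map Prod.fst).Nodup) :
    PySem.List.sorted ia (fun kv => kv.1) = PySem.List.sorted ib (fun kv => kv.1)
    ↔ ia.Perm ib := by
  constructor
  · intro he
    exact (((PySem.List.sorted_perm ia (fun kv => kv.1) false)).symm.trans (he ▸
      (PySem.List.sorted_perm ib (fun kv => kv.1) false)))
  · intro hperm
    have hperm' : (PySem.List.sorted ia (fun kv => kv.1)).Perm ib :=
      ((PySem.List.sorted_perm ia (fun kv => kv.1) false)).trans hperm
    have hle : (PySem.List.sorted ia (fun kv => kv.1)).Pairwise
        (fun p q : String × Int => p.1 ≤ q.1) :=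
      PySem.List.sorted_pairwise ia (fun kv => kv.1)
    have hnd : ((PySem.List.sorted ia (fun kv => kv.1)).map Prod.fst).Nodup := by
      have : ((PySem.List.sorted ia (fun kv => kv.1)).map Prod.fst).Perm (ia.map Prod.fst) :=
        ((PySem.List.sorted_perm ia (fun kv => kv.1) false)).map Prod.fst
      exact this.nodup_iff.mpr ha
    have hne : (PySem.List.sorted ia (fun kv => kv.1)).Pairwise
        (fun p q : String × Int => p.1 ≠ q.1) := List.pairwise_map.mp hnd
    have hlt : (PySem.List.sorted ia (fun kv => kv.1)).Pairwise
        (fun p q : String × Int => p.1 < q.1) :=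
      (hle.and hne).imp (fun h => lt_of_le_of_ne h.1 h.2)
    exact (PySem.List.sorted_eq_of_perm_of_pairwise_lt ib
      (PySem.List.sorted ia (fun kv => kv.1)) (fun kv => kv.1) hperm' hlt).symm

-- ===== VERDICT (by name: the statement is the Claim_ definition above) =====
theorem hasSameFreq_spec : Claim_equal_hasSameFreq := by
  intro a b _
  unfold Spec_hasSameFreq hasSameFreq hasSameFreq_alt
  set da := PySem.Dict.ofList a with hda
  set db := PySem.Dict.ofList b with hdb
  have ha : da.keys.Nodup := PySem.Dict.nodup_keys_ofList a
  have hb : db.keys.Nodup := PySem.Dict.nodup_keys_ofList b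
  have hiff := (pvDirProp_iff_perm da db ha hb).trans
    (sorted_items_eq_iff_perm da.items db.items ha).symm
  simp only [pvLoopA_eq_all]
  by_cases hP : (∀ k ∈ da.keys, db.contains k = true ∧ db.get? k = da.get? k) ∧
                (∀ k ∈ db.keys, da.contains k = true ∧ da.get? k = db.get? k)
  · have hA1 : da.keys.all (fun k => db.contains k && (db.get? k == da.get? k)) = true := by
      rw [List.all_eq_true]; intro k hk; obtain ⟨c, e⟩ := hP.1 k hk; simp [c, e]
    have hA2 : db.keys.all (fun k => da.contains k && (da.get? k == db.get? k)) = true := by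
      rw [List.all_eq_true]; intro k hk; obtain ⟨c, e⟩ := hP.2 k hk; simp [c, e]
    have hB : PySem.List.sorted da.items (fun kv => kv.1)
        = PySem.List.sorted db.items (fun kv => kv.1) := hiff.mp hP
    simp [hA1, hA2, hB]
  · have hB : PySem.List.sorted da.items (fun kv => kv.1)
        ≠ PySem.List.sorted db.items (fun kv => kv.1) := fun h => hP (hiff.mpr h)
    rcases not_and_or.mp hP with h | h
    · have hA1 : da.keys.all (fun k => db.contains k && (db.get? k == da.get? k)) = false := by
        rw [← Bool.not_eq_true]; intro ht; apply h; intro k hk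
        have := List.all_eq_true.mp ht k hk; simp at this; exact ⟨this.1, this.2⟩
      simp [hA1, hB]
    · have hA2 : db.keys.all (fun k => da.contains k && (da.get? k == db.get? k)) = false := by
        rw [← Bool.not_eq_true]; intro ht; apply h; intro k hk
        have := List.all_eq_true.mp ht k hk; simp at this; exact ⟨this.1, this.2⟩
      by_cases hA1 : da.keys.all (fun k => db.contains k && (db.get? k == da.get? k)) = false <;>
        simp [hA1, hA2, hB]
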